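-- pv_equiv track=rewrite | github.com/SimeonChifligarov/Alpha_Judge_Softuni | Python_Basics/PB_More_Exercises/06_Nested_Loops_More_Exercises/07_Safe_Passwords_Generator_advanced.py | password_generator
-- ===== SOURCE A (Python) =====
-- def password_generator(a, b, max_passwords):
--     A = 35
--     B = 64
--     passwords = []
--     count = 0
--
--     for x in range(1, a + 1):
--         for y in range(1, b + 1):
--             if count >= max_passwords:
--                 return passwords
--
--             password = f'{chr(A)}{chr(B)}{x}{y}{chr(B)}{chr(A)}'
--             passwords.append(password)
--             count += 1
--
--             A += 1
--             B += 1
--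
--             if A > 55:
--                 A = 35
--             if B > 96:
--                 B = 64
--
--     return passwords
-- ===== SOURCE B (Python) =====
-- def password_generator(a, b, max_passwords):
--     if a <= 0 or b <= 0:
--         return []
--     total = min(a * b, max_passwords)
--     out = []
--     for i in range(total):
--         x, y = divmod(i, b)
--         ca = chr(35 + i % 21)
--         cb = chr(64 + i % 33)
--         out.append(f'{ca}{cb}{x + 1}{y + 1}{cb}{ca}')
--     return out
-- ===== Notes on version B (the rewrite author's own statement) =====
-- stated objective: alternative
-- what changed: Replaces A's nested x/y loops with mutable count and cycling character registers (and an early return) by a single flat loop over i in range(min(a*b, max_passwords)) that derives x, y via divmod and both cycling codes in closed form as 35 + i% 21 and 64 + i % 33.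
import Mathlib
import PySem

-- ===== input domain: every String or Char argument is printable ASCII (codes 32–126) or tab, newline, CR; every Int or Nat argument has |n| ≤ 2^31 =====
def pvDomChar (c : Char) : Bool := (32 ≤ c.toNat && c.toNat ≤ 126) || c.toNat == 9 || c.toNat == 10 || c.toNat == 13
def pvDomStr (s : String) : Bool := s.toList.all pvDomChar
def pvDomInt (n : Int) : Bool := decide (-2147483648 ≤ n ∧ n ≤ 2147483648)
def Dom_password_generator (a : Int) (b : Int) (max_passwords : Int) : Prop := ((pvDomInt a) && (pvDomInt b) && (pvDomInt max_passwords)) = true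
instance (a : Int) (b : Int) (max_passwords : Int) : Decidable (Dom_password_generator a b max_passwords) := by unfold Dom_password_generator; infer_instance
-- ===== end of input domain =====

-- B replaces A's nested loops with mutable count/A/B registers and an early return by one flat
-- index loop deriving x, y and both cycling character codes in closed form (alternative decomposition).


-- ===== PORT A =====
-- Python chr(n); exact for 0 ≤ n < 0x110000 (both programs only apply it to codes 35..96)
def pgChr (n : Int) : Char := Char.ofNat n.toNat

-- A's inner `for y in range(1, b+1)` with its early `return passwords` (Sum.inl = returned,
-- Sum.inr = loop finished, carry on); the loop is the obvious recursion on the counter y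
def pgInner (mp b x : Int) (y : Int) (ps : List String) (cnt A B : Int) :
    Sum (List String) (List String × Int × Int × Int) :=
  if h : y < b + 1 then
    if mp ≤ cnt then Sum.inl ps
    else
      let pw := String.ofList ([pgChr A, pgChr B] ++ PySem.Int.toChars x ++ PySem.Int.toChars y ++ [pgChr B, pgChr A])
      let A1 := A + 1
      let B1 := B + 1
      let A2 := if A1 > 55 then 35 else A1
      let B2 := if B1 > 96 then 64 else B1
      pgInner mp b x (y + 1) (ps ++ [pw]) (cnt + 1) A2 B2
  else Sum.inr (ps, cnt, A, B)
termination_by (b + 1 - y).toNat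
decreasing_by omega

-- A's outer `for x in range(1, a+1)`
def pgOuter (mp a b : Int) (x : Int) (ps : List String) (cnt A B : Int) : List String :=
  if h : x < a + 1 then
    match pgInner mp b x 1 ps cnt A B with
    | Sum.inl res => res
    | Sum.inr (ps', cnt', A', B') => pgOuter mp a b (x + 1) ps' cnt' A' B'
  else ps
termination_by (a + 1 - x).toNat
decreasing_by omega

def password_generator (a : Int) (b : Int) (max_passwords : Int) : List String :=
  pgOuter max_passwords a b 1 [] 0 35 64

-- ===== PORT B =====
-- one password from the flat index i (B's loop body)
def pgItemB (b : Int) (i : Int) : String :=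
  let x := PySem.Int.floordiv i b
  let y := PySem.Int.mod i b
  let ca := pgChr (35 + PySem.Int.mod i 21)
  let cb := pgChr (64 + PySem.Int.mod i 33)
  String.ofList ([ca, cb] ++ PySem.Int.toChars (x + 1) ++ PySem.Int.toChars (y + 1) ++ [cb, ca])

def password_generator_alt (a : Int) (b : Int) (max_passwords : Int) : List String :=
  if a ≤ 0 ∨ b ≤ 0 then []
  else
    (PySem.List.pyRange 0 (min (a * b) max_passwords) 1).map (pgItemB b)

-- ===== PRECONDITION & SPEC =====
def Spec_password_generator (a : Int) (b : Int) (max_passwords : Int) (out : List String) : Prop := out = password_generator_alt a b max_passwords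
instance (a : Int) (b : Int) (max_passwords : Int) (out : List String) : Decidable (Spec_password_generator a b max_passwords out) := by unfold Spec_password_generator; infer_instance

-- ===== CLAIM (what is proved, stated in full; the proofs are below) =====
def Claim_equal_password_generator : Prop := ∀ (a : Int) (b : Int) (max_passwords : Int), Dom_password_generator a b max_passwords → Spec_password_generator a b max_passwords (password_generator a b max_passwords)

-- ===== LEMMAS AND PROOFS =====

-- A's character registers after c appended passwords
def regA (c : Nat) : Int := 35 + ((c % 21 : Nat) : Int)
def regB (c : Nat) : Int := 64 + ((c % 33 : Nat) : Int)

-- the first c passwords, in B's closed form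
def pref (b : Int) (c : Nat) : List String := (List.range c).map (fun i : Nat => pgItemB b (i : Int))

theorem pg_inner_spec (b mp x : Int) (hb : 1 ≤ b) :
    ∀ (n : Nat) (y : Int) (c : Nat), n = (b + 1 - y).toNat → 1 ≤ y → y ≤ b + 1 →
      (c : Int) = (x - 1) * b + (y - 1) → (y = b + 1 → (c : Int) ≤ mp) →
    pgInner mp b x y (pref b c) c (regA c) (regB c)
      = if (c : Int) + n ≤ mp then
          Sum.inr (pref b (c + n), ((c + n : Nat) : Int), regA (c + n), regB (c + n))
        else Sum.inl (pref b (if mp ≤ (c : Int) then c else mp.toNat)) := by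
  intro n
  induction n with
  | zero =>
      intro y c hn hy1 hy2 hc h0
      have hy : y = b + 1 := by omega
      have hcmp : (c : Int) ≤ mp := h0 hy
      rw [pgInner]
      rw [dif_neg (by omega)]
      rw [if_pos (by omega)]
      norm_num
  | succ n ih =>
      intro y c hn hy1 hy2 hc h0
      have hyb : y < b + 1 := by omega
      rw [pgInner, dif_pos hyb]
      by_cases hmp : mp ≤ (c : Int)
      · rw [if_pos hmp, if_neg (by push_cast; omega), if_pos hmp]
      · rw [if_neg hmp]
        simp only []
        have hx : PySem.Int.floordiv (c : Int) b = x - 1 := by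
          rw [PySem.Int.floordiv_eq_iff_of_pos (by omega)]
          have he : (x - 1 + 1) * b = (x - 1) * b + b := by ring
          constructor
          · linarith [hc]
          · rw [he]; linarith [hc]
        have hy : PySem.Int.mod (c : Int) b = y - 1 := by
          have := PySem.Int.floordiv_mul_add_mod (c : Int) b
          rw [hx] at this; linarith [hc, this]
        have hpw : (pref b c) ++ [String.ofList ([pgChr (regA c), pgChr (regB c)] ++ PySem.Int.toChars x
              ++ PySem.Int.toChars y ++ [pgChr (regB c), pgChr (regA c)])] = pref b (c + 1) := by
          simp only [pref, List.range_succ, List.map_append, List.map_singleton]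
          congr 2
          simp only [pgItemB, hx, hy]
          have h21 : PySem.Int.mod (c : Int) 21 = ((c % 21 : Nat) : Int) := by
            exact_mod_cast PySem.Int.mod_natCast c 21
          have h33 : PySem.Int.mod (c : Int) 33 = ((c % 33 : Nat) : Int) := by
            exact_mod_cast PySem.Int.mod_natCast c 33
          rw [h21, h33]
          have hx1 : x - 1 + 1 = x := by ring
          have hy1' : y - 1 + 1 = y := by ring
          rw [hx1, hy1']
          rfl
        have hA : (if regA c + 1 > 55 then 35 else regA c + 1) = regA (c + 1) := by
          simp only [regA]
          split_ifs with h <;> omega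
        have hB : (if regB c + 1 > 96 then 64 else regB c + 1) = regB (c + 1) := by
          simp only [regB]
          split_ifs with h <;> omega
        have hcnt : (c : Int) + 1 = ((c + 1 : Nat) : Int) := by push_cast; ring
        rw [hpw, hA, hB, hcnt]
        rw [ih (y + 1) (c + 1) (by omega) (by omega) (by omega) (by push_cast; linarith) (by intro h; omega)]
        by_cases hend : (c : Int) + ((n + 1 : Nat) : Int) ≤ mp
        · rw [if_pos (by push_cast at hend ⊢; omega), if_pos hend]
          have : c + 1 + n = c + (n + 1) := by omega
          rw [this]
        · rw [if_neg (by push_cast at hend ⊢; omega), if_neg hend]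
          have hm : (if mp ≤ ((c + 1 : Nat) : Int) then c + 1 else mp.toNat) = mp.toNat := by
            split_ifs with h <;> omega
          have hm2 : (if mp ≤ (c : Int) then c else mp.toNat) = mp.toNat := by rw [if_neg hmp]
          rw [hm, hm2]

theorem pg_outer_spec (a b mp : Int) (hb : 1 ≤ b) :
    ∀ (r : Nat) (x : Int) (c : Nat), r = (a + 1 - x).toNat → 1 ≤ x → x ≤ a + 1 →
      (c : Int) = (x - 1) * b → (x = a + 1 → (c : Int) ≤ mp) →
    pgOuter mp a b x (pref b c) c (regA c) (regB c)
      = pref b (if (c : Int) + r * b ≤ mp then c + r * b.toNat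
                else if mp ≤ (c : Int) then c else mp.toNat) := by
  have hbt : (b.toNat : Int) = b := by omega
  intro r
  induction r with
  | zero =>
      intro x c hr hx1 hx2 hc h0
      have hx : x = a + 1 := by omega
      have hcmp : (c : Int) ≤ mp := h0 hx
      rw [pgOuter, dif_neg (by omega)]
      rw [if_pos (by push_cast; omega)]
      norm_num
  | succ r ih =>
      intro x c hr hx1 hx2 hc h0
      have hxa : x < a + 1 := by omega
      rw [pgOuter, dif_pos hxa]
      rw [pg_inner_spec b mp x hb b.toNat 1 c (by omega) (by omega) (by omega) (by push_cast; linarith) (by intro h; omega)]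
      have hexp : (((r : Nat) : Int) + 1) * b = ((r : Nat) : Int) * b + b := by ring
      have hrb : (0 : Int) ≤ ((r : Nat) : Int) * b := by positivity
      by_cases hrowfit : (c : Int) + ((b.toNat : Nat) : Int) ≤ mp
      · rw [if_pos hrowfit]
        simp only []
        rw [hbt] at hrowfit
        have hc' : ((c + b.toNat : Nat) : Int) = (x + 1 - 1) * b := by
          push_cast; rw [hbt]
          have : (x + 1 - 1) * b = (x - 1) * b + b := by ring
          rw [this]; linarith
        rw [ih (x + 1) (c + b.toNat) (by omega) (by omega) (by omega) hc'
          (by intro h; push_cast; rw [hbt]; linarith)]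
        by_cases hall : (c : Int) + ((r + 1 : Nat) : Int) * b ≤ mp
        · rw [if_pos (by push_cast at hall ⊢; rw [hbt]; linarith), if_pos hall]
          have : c + b.toNat + r * b.toNat = c + (r + 1) * b.toNat := by ring
          rw [this]
        · rw [if_neg (by push_cast at hall ⊢; rw [hbt]; linarith), if_neg hall]
          have hm : (if mp ≤ ((c + b.toNat : Nat) : Int) then c + b.toNat else mp.toNat) = mp.toNat := by
            split_ifs with h <;> omega
          have hm2 : (if mp ≤ (c : Int) then c else mp.toNat) = mp.toNat := by
            rw [if_neg (by omega)]
          rw [hm, hm2]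
      · rw [if_neg hrowfit]
        rw [hbt] at hrowfit
        simp only []
        rw [if_neg (show ¬((c : Int) + ((r + 1 : Nat) : Int) * b ≤ mp) by push_cast; linarith)]

-- with b ≤ 0 the inner range is empty, so A's outer loop carries its state around unchanged
theorem pg_outer_empty (a b mp : Int) (hb : b ≤ 0) (ps : List String) (cnt A B : Int) :
    ∀ (r : Nat) (x : Int), r = (a + 1 - x).toNat →
    pgOuter mp a b x ps cnt A B = ps := by
  intro r
  induction r with
  | zero =>
      intro x hr
      rw [pgOuter, dif_neg (by omega)]
  | succ r ih =>
      intro x hr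
      by_cases hxa : x < a + 1
      · rw [pgOuter, dif_pos hxa]
        have hin : pgInner mp b x 1 ps cnt A B = Sum.inr (ps, cnt, A, B) := by
          rw [pgInner, dif_neg (by omega)]
        rw [hin]
        simp only []
        rw [ih (x + 1) (by omega)]
      · rw [pgOuter, dif_neg hxa]

theorem password_generator_spec : Claim_equal_password_generator := by
  intro a b mp _
  unfold Spec_password_generator password_generator password_generator_alt
  by_cases hdeg : a ≤ 0 ∨ b ≤ 0
  · rw [if_pos hdeg]
    rcases hdeg with ha | hb
    · rw [pgOuter, dif_neg (by omega)]
    · exact pg_outer_empty a b mp hb [] 0 35 64 (a + 1 - 1).toNat 1 rfl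
  · rw [if_neg hdeg]
    rw [not_or] at hdeg
    simp only [not_le] at hdeg
    obtain ⟨ha, hb⟩ := hdeg
    have hb1 : 1 ≤ b := by omega
    have hat : (a.toNat : Int) = a := by omega
    have hmain := pg_outer_spec a b mp hb1 a.toNat 1 0 (by omega) (by omega) (by omega)
      (by push_cast; ring) (by intro h; omega)
    have hinit : pref b 0 = ([] : List String) := rfl
    rw [hinit, show regA 0 = 35 from rfl, show regB 0 = 64 from rfl] at hmain
    simp only [Nat.cast_zero, zero_add, Nat.zero_add] at hmain
    rw [hmain]
    have hBside : PySem.List.pyRange 0 (min (a * b) mp) 1 = (List.range (min (a * b) mp).toNat).map (fun k : Nat => ((k : Nat) : Int)) := by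
      rw [PySem.List.pyRange_one]
      simp
    rw [hBside, List.map_map]
    by_cases hall : (a.toNat : Int) * b ≤ mp
    · rw [if_pos hall]
      rw [hat] at hall
      have hmin : (min (a * b) mp).toNat = a.toNat * b.toNat := by
        have h1 : min (a * b) mp = a * b := by omega
        rw [h1]
        have h2 : a * b = (a.toNat : Int) * (b.toNat : Int) := by rw [hat]; congr 1; omega
        rw [h2]; push_cast; omega
      rw [hmin]
      rfl
    · rw [if_neg hall]
      rw [hat] at hall
      have hm : (if mp ≤ (0 : Int) then (0 : Nat) else mp.toNat) = (min (a * b) mp).toNat := by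
        split_ifs with h <;> omega
      rw [hm]
      rfl
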